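-- pv_equiv track=rewrite | github.com/haileymoon/Algorithm_Practice | 백준문제/실버/한수_1065.py | check_wrong_diff
-- ===== SOURCE A (Python) =====
-- def check_wrong_diff(string_num):
--     diff = 987654321
--     flag = False
--     for i in range(len(string_num), 1, -1):
--         value = int(string_num[i-1]) - int(string_num[i - 2])
--         if diff == 987654321:
--             diff = value
--         else:
--             if diff != value:
--                 flag = True
--     return flag
-- ===== SOURCE B (Python) =====
-- def check_wrong_diff(string_num):
--     if len(string_num) < 2:
--         return False
--     d = [int(c) for c in string_num]
--     return any(a + c != 2 * b for a, b, c in zip(d, d[1:], d[2:]))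
-- ===== Notes on version B (the rewrite author's own statement) =====
-- stated objective: simpler
-- what changed: B never computes or stores a reference difference: it converts the digits once, slides a three-digit window (zip(d, d[1:], d[2:])) and tests the local second-difference condition a + c != 2*b with any(); A instead walks indices backward, parks the first difference behind a sentinel constant and toggles a flag against it on every later step.
import Mathlib
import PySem

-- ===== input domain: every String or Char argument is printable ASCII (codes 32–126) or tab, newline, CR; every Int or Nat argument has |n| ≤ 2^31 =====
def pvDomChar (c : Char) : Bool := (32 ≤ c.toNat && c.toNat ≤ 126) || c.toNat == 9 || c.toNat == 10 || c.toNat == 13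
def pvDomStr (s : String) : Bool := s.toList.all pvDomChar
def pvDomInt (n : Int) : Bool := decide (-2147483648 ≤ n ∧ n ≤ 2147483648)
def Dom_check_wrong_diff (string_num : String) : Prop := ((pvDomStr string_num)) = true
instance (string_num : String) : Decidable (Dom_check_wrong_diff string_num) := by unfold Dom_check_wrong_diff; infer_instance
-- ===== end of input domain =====

-- B replaces A's backward reference-diff-and-flag loop by a sliding three-digit window
-- testing the local second-difference condition a + c != 2*b (simpler; no speed claim).

-- ===== PORT A =====
-- int(string_num[i]) : index then int() of the one-character string; under Pre_ the index is
-- in range and the character is a digit, so the getD defaults are unreachable there.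
def pvInt1 (cs : List Char) (i : Int) : Int :=
  match PySem.List.pyGet? cs i with
  | some c => (PySem.Int.ofChars? [c]).getD 0
  | none => 0

-- the body of A's for-loop, on the already computed value
def pvStep (st : Int × Bool) (value : Int) : Int × Bool :=
  if st.1 = 987654321 then (value, st.2)
  else if st.1 ≠ value then (st.1, true) else st

def check_wrong_diff (string_num : String) : Bool :=
  let cs := string_num.toList
  ((PySem.List.pyRange (cs.length : Int) 1 (-1)).foldl
      (fun st i => pvStep st (pvInt1 cs (i - 1) - pvInt1 cs (i - 2)))
      ((987654321 : Int), false)).2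

-- ===== PORT B =====
-- int(c) on a one-character string; under Pre_ the character is a digit, so getD is unreachable.
def pvDig (c : Char) : Int := (PySem.Int.ofChars? [c]).getD 0

def check_wrong_diff_alt (string_num : String) : Bool :=
  let cs := string_num.toList
  if cs.length < 2 then false
  else
    let d := cs.map pvDig
    ((d.zip (PySem.List.slice d (some 1) none)).zip (PySem.List.slice d (some 2) none)).any
      (fun t => decide (t.1.1 + t.2 ≠ 2 * t.1.2))

-- ===== PRECONDITION & SPEC =====
-- Pre_ excludes exactly the inputs where A raises ValueError: strings of length ≥ 2
-- containing a non-digit character (int() fails on some character there).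
def Pre_check_wrong_diff (string_num : String) : Prop :=
  string_num.toList.length ≤ 1 ∨ string_num.toList.all PySem.Chars.isdigit = true
instance (string_num : String) : Decidable (Pre_check_wrong_diff string_num) := by
  unfold Pre_check_wrong_diff; infer_instance

def pvWitness_check_wrong_diff : String := "1234"

def Spec_check_wrong_diff (string_num : String) (out : Bool) : Prop := out = check_wrong_diff_alt string_num
instance (string_num : String) (out : Bool) : Decidable (Spec_check_wrong_diff string_num out) := by unfold Spec_check_wrong_diff; infer_instance

-- ===== CLAIM (what is proved, stated in full; the proofs are below) =====
def Claim_equal_check_wrong_diff : Prop := ∀ (string_num : String), Dom_check_wrong_diff string_num → Pre_check_wrong_diff string_num → Spec_check_wrong_diff string_num (check_wrong_diff string_num)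

-- ===== LEMMAS AND PROOFS =====

-- a digit character parses to its value
lemma pvOfChars_digit (c : Char) (h : PySem.Chars.isdigit c = true) :
    (PySem.Int.ofChars? [c]).getD 0 = ((c.toNat : Int) - 48) := by
  have hb : 48 ≤ c.toNat ∧ c.toNat ≤ 57 := by
    simp only [PySem.Chars.isdigit, Bool.and_eq_true, decide_eq_true_eq, Char.le_def,
      UInt32.le_iff_toNat_le] at h
    exact ⟨h.1, h.2⟩
  have hc : Char.ofNat c.toNat = c := Char.ofNat_toNat c
  have hcase : c.toNat = 48 ∨ c.toNat = 49 ∨ c.toNat = 50 ∨ c.toNat = 51 ∨ c.toNat = 52 ∨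
      c.toNat = 53 ∨ c.toNat = 54 ∨ c.toNat = 55 ∨ c.toNat = 56 ∨ c.toNat = 57 := by omega
  rcases hcase with h' | h' | h' | h' | h' | h' | h' | h' | h' | h' <;>
    · rw [← hc, h']; decide

-- pvInt1 always lands in [0, 9] on an all-digit string
lemma pvInt1_bound (cs : List Char) (hdig : cs.all PySem.Chars.isdigit = true) (i : Int) :
    0 ≤ pvInt1 cs i ∧ pvInt1 cs i ≤ 9 := by
  unfold pvInt1
  cases hg : PySem.List.pyGet? cs i with
  | none => simp
  | some c =>
      have hmem : c ∈ cs := by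
        simp only [PySem.List.pyGet?, PySem.List.pyIdx?] at hg
        split at hg <;> split at hg <;>
          simp only [Option.bind_some, Option.bind_none] at hg <;>
          first
            | exact List.mem_of_getElem? hg
            | cases hg
      have hd : PySem.Chars.isdigit c = true := by
        rw [List.all_eq_true] at hdig; exact hdig c hmem
      have hb : 48 ≤ c.toNat ∧ c.toNat ≤ 57 := by
        simp only [PySem.Chars.isdigit, Bool.and_eq_true, decide_eq_true_eq, Char.le_def,
          UInt32.le_iff_toNat_le] at hd
        exact ⟨hd.1, hd.2⟩
      simp only [pvOfChars_digit c hd]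
      omega

-- running A's loop body after the reference diff is fixed
lemma pvStep_run (rest : List Int) (v : Int) (flag : Bool) (hv : v ≠ 987654321) :
    rest.foldl pvStep (v, flag) = (v, flag || rest.any (fun w => decide (w ≠ v))) := by
  induction rest generalizing flag with
  | nil => simp
  | cons w t ih =>
      have hstep : pvStep (v, flag) w = (v, flag || decide (w ≠ v)) := by
        by_cases h : v = w <;> simp [pvStep, hv, h, ne_comm]
      simp only [List.foldl_cons, List.any_cons, hstep, ih, Bool.or_assoc]

-- A's whole loop on a nonempty sentinel-free value list
lemma pvAfold (v : Int) (rest : List Int) (hv : v ≠ 987654321) :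
    ((v :: rest).foldl pvStep ((987654321 : Int), false)).2
      = rest.any (fun w => decide (w ≠ v)) := by
  have h0 : pvStep ((987654321 : Int), false) v = (v, false) := by simp [pvStep]
  simp [List.foldl_cons, h0, pvStep_run rest v false hv]

lemma pvAny_ne_iff (v : Int) (rest : List Int) :
    rest.any (fun w => decide (w ≠ v)) = true ↔ ∃ a ∈ v :: rest, ∃ b ∈ v :: rest, a ≠ b := by
  simp only [List.any_eq_true, decide_eq_true_eq, List.mem_cons]
  constructor
  · rintro ⟨w, hw, hne⟩
    exact ⟨v, Or.inl rfl, w, Or.inr hw, Ne.symm hne⟩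
  · rintro ⟨a, ha, b, hb, hne⟩
    rcases ha with rfl | ha
    · rcases hb with rfl | hb
      · exact absurd rfl hne
      · exact ⟨b, hb, Ne.symm hne⟩
    · by_cases hav : a = v
      · subst hav
        rcases hb with rfl | hb
        · exact absurd rfl hne
        · exact ⟨b, hb, Ne.symm hne⟩
      · exact ⟨a, ha, hav⟩

-- A's backward value list is the reverse of the forward difference list
lemma pvLists_eq (cs : List Char) :
    (PySem.List.pyRange (cs.length : Int) 1 (-1)).map
        (fun i => pvInt1 cs (i - 1) - pvInt1 cs (i - 2))
      = ((PySem.List.pyRange 1 (cs.length : Int) 1).map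
        (fun i => pvInt1 cs i - pvInt1 cs (i - 1))).reverse := by
  rw [PySem.List.pyRange_neg_one_eq_reverse, List.map_reverse]
  congr 1
  rw [PySem.List.pyRange_one, PySem.List.pyRange_one, List.map_map, List.map_map]
  have hlen : ((cs.length : Int) + 1 - (1 + 1)).toNat = ((cs.length : Int) - 1).toNat := by omega
  rw [hlen]
  apply List.map_congr_left
  intro k _
  simp only [Function.comp]
  congr 2 <;> omega

-- the list of consecutive differences (proof-side characterisation)
def pvDiffL : List Int → List Int
  | a :: b :: t => (b - a) :: pvDiffL (b :: t)
  | _ => []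

lemma pvDiffL_len (l : List Int) : (pvDiffL l).length = l.length - 1 := by
  induction l with
  | nil => simp [pvDiffL]
  | cons a t ih =>
      cases t with
      | nil => simp [pvDiffL]
      | cons b u => simp [pvDiffL, ih]

lemma pvDiffL_get (l : List Int) (k : Nat) (h : k + 1 < l.length) :
    (pvDiffL l)[k]'(by rw [pvDiffL_len]; omega) = l[k + 1] - l[k]'(by omega) := by
  induction l generalizing k with
  | nil => simp at h
  | cons a t ih =>
      cases t with
      | nil => simp at h
      | cons b u =>
          cases k with
          | zero => simp [pvDiffL]
          | succ m =>
              have hm : m + 1 < (b :: u).length := by simpa using h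
              simpa [pvDiffL] using ih m hm

-- a list is constant iff adjacent elements are equal
lemma pvChain_iff (l : List Int) :
    l.IsChain (· = ·) ↔ ∀ a ∈ l, ∀ b ∈ l, a = b := by
  induction l with
  | nil => simp
  | cons x t ih =>
      cases t with
      | nil => simp
      | cons y u =>
          rw [List.isChain_cons_cons, ih]
          constructor
          · rintro ⟨rfl, hall⟩
            have hx : ∀ c ∈ x :: u, c = x := fun c hc => hall c hc x (by simp)
            intro a ha b hb
            rcases List.mem_cons.mp ha with rfl | ha'
            · rcases List.mem_cons.mp hb with rfl | hb'
              · rfl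
              · exact (hx b hb').symm
            · rcases List.mem_cons.mp hb with rfl | hb'
              · exact hx a ha'
              · rw [hx a ha', hx b hb']
          · intro hall
            exact ⟨hall x (by simp) y (by simp),
              fun a ha b hb => hall a (by simp [ha]) b (by simp [hb])⟩

-- B's sliding-window test detects exactly a bend in the difference list
lemma pvB_iff (l : List Int) :
    (((l.zip (l.drop 1)).zip (l.drop 2)).any
        (fun t => decide (t.1.1 + t.2 ≠ 2 * t.1.2))) = true
      ↔ ¬ (pvDiffL l).IsChain (· = ·) := by
  induction l with
  | nil => simp [pvDiffL]
  | cons a t ih =>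
      cases t with
      | nil => simp [pvDiffL]
      | cons b u =>
          cases u with
          | nil => simp [pvDiffL]
          | cons c v =>
              have hzip : (((a :: b :: c :: v).zip ((a :: b :: c :: v).drop 1)).zip
                  ((a :: b :: c :: v).drop 2))
                  = ((a, b), c) :: (((b :: c :: v).zip ((b :: c :: v).drop 1)).zip
                      ((b :: c :: v).drop 2)) := by
                simp [List.zip]
              rw [hzip, List.any_cons, Bool.or_eq_true, ih]
              have hd : pvDiffL (a :: b :: c :: v) = (b - a) :: pvDiffL (b :: c :: v) := by
                simp [pvDiffL]
              have hd2 : pvDiffL (b :: c :: v) = (c - b) :: pvDiffL (c :: v) := by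
                simp [pvDiffL]
              rw [hd, hd2, List.isChain_cons_cons, ← hd2]
              constructor
              · rintro (h1 | h2)
                · simp only [decide_eq_true_eq] at h1
                  rintro ⟨he, -⟩
                  omega
                · rintro ⟨-, h2'⟩
                  exact h2 h2'
              · intro h
                by_cases he : b - a = c - b
                · right
                  intro h2
                  exact h ⟨he, h2⟩
                · left
                  simp only [decide_eq_true_eq]
                  omega

-- the forward pyRange difference list is pvDiffL of the digit list
lemma pvFwd_eq (cs : List Char) :
    (PySem.List.pyRange 1 (cs.length : Int) 1).map (fun i => pvInt1 cs i - pvInt1 cs (i - 1))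
      = pvDiffL (cs.map pvDig) := by
  apply List.ext_getElem
  · rw [List.length_map, PySem.List.length_pyRange_one, pvDiffL_len, List.length_map]
    omega
  · intro k h1 h2
    have hk : k + 1 < cs.length := by
      rw [List.length_map, PySem.List.length_pyRange_one] at h1
      omega
    have hr : (PySem.List.pyRange 1 (cs.length : Int) 1)[k]'(by
        rw [PySem.List.length_pyRange_one]; omega) = 1 + k :=
      PySem.List.getElem_pyRange_one _ _ _ _
    have hv1 : pvInt1 cs (1 + (k : Int)) = pvDig (cs[k + 1]'hk) := by
      have : (1 : Int) + (k : Int) = ((k + 1 : Nat) : Int) := by omega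
      rw [this]
      unfold pvInt1
      rw [PySem.List.pyGet?_natCast, List.getElem?_eq_getElem hk]
      rfl
    have hv0 : pvInt1 cs ((1 + (k : Int)) - 1) = pvDig (cs[k]'(by omega)) := by
      have : (1 : Int) + (k : Int) - 1 = ((k : Nat) : Int) := by omega
      rw [this]
      unfold pvInt1
      rw [PySem.List.pyGet?_natCast, List.getElem?_eq_getElem (by omega : k < cs.length)]
      rfl
    rw [List.getElem_map, hr, hv1, hv0,
      pvDiffL_get (cs.map pvDig) k (by rw [List.length_map]; exact hk)]
    simp

theorem check_wrong_diff_spec : Claim_equal_check_wrong_diff := by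
  intro s _ hPre
  unfold Spec_check_wrong_diff check_wrong_diff check_wrong_diff_alt
  show ((PySem.List.pyRange ((s.toList.length : Int)) 1 (-1)).foldl
        (fun st i => pvStep st (pvInt1 s.toList (i - 1) - pvInt1 s.toList (i - 2)))
        ((987654321 : Int), false)).2
      = if s.toList.length < 2 then false
        else (((s.toList.map pvDig).zip (PySem.List.slice (s.toList.map pvDig) (some 1) none)).zip
            (PySem.List.slice (s.toList.map pvDig) (some 2) none)).any
            (fun t => decide (t.1.1 + t.2 ≠ 2 * t.1.2))
  by_cases hlt : s.toList.length < 2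
  · -- fewer than two characters: A's loop range is empty, B's guard fires
    have h1 : ((s.toList.length : Int)) ≤ 1 := by exact_mod_cast Nat.lt_succ_iff.mp hlt
    rw [PySem.List.pyRange_neg_one_eq_nil h1, if_pos hlt]
    simp
  · have hdig : s.toList.all PySem.Chars.isdigit = true := by
      rcases hPre with hlen | hdig
      · omega
      · exact hdig
    rw [if_neg hlt,
        show PySem.List.slice (s.toList.map pvDig) (some 1) none = (s.toList.map pvDig).drop 1
          from by simp [PySem.List.slice_from_one],
        show PySem.List.slice (s.toList.map pvDig) (some 2) none = (s.toList.map pvDig).drop 2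
          from by simp [PySem.List.slice_from]]
    rw [← List.foldl_map, pvLists_eq s.toList, Bool.eq_iff_iff, pvB_iff, ← pvFwd_eq]
    have hbound : ∀ w ∈ (PySem.List.pyRange 1 ((s.toList.length : Int)) 1).map
        (fun i => pvInt1 s.toList i - pvInt1 s.toList (i - 1)), w ≠ 987654321 := by
      intro w hw
      rw [List.mem_map] at hw
      obtain ⟨i, _, rfl⟩ := hw
      have h1 := pvInt1_bound s.toList hdig i
      have h2 := pvInt1_bound s.toList hdig (i - 1)
      omega
    cases hds : ((PySem.List.pyRange 1 ((s.toList.length : Int)) 1).map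
        (fun i => pvInt1 s.toList i - pvInt1 s.toList (i - 1))).reverse with
    | nil =>
        rw [List.reverse_eq_nil_iff.mp hds]
        simp
    | cons v rest =>
        rw [pvAfold v rest (hbound v (by rw [← List.mem_reverse, hds]; simp))]
        rw [pvAny_ne_iff, pvChain_iff]
        push Not
        constructor
        · rintro ⟨a, ha, b, hb, hne⟩
          rw [← hds, List.mem_reverse] at ha hb
          exact ⟨a, ha, b, hb, hne⟩
        · rintro ⟨a, ha, b, hb, hne⟩
          rw [← List.mem_reverse, hds] at ha hb
          exact ⟨a, ha, b, hb, hne⟩
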